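-- pv_equiv track=rewrite | github.com/MuhammadMehdiRaza/AI_Semester_Project | AI_Project/data/generated_dataset/files/code_trans_159.py | ft_v4
-- ===== SOURCE A (Python) =====
-- def factorial_v1(x7):
--     x4 = 1
--     for x2 in range(2, x7 + 1):
--         x4 *= x2
--     return x4
--
-- def ft_v4(x3):
--     x6 = 0
--     for x1 in range(1, x3 + 1):
--         if x1 % 2 == 0:
--             x6 += factorial_v1(x1)
--         else:
--             x6 += x1
--     return x6
-- ===== SOURCE B (Python) =====
-- def ft_v4(x3):
--     if x3 < 1:
--         return 0
--     k = (x3 + 1) // 2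
--     total = k * k          # sum of the odd numbers 1,3,... <= x3, in closed form
--     f = 1                  # running factorial: after the j-th step, f == (2*j)!
--     for i in range(2, x3 + 1, 2):
--         f *= (i - 1) * i
--         total += f
--     return total
-- ===== Notes on version B (the rewrite author's own statement) =====
-- stated objective: faster
-- what changed: B replaces A's per-element loop (which recomputes each even factorial from scratch) by the closed form ((n+1)//2)**2 for the odd contribution plus a single stride-2 pass that maintains a running factorial product.
import Mathlib
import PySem

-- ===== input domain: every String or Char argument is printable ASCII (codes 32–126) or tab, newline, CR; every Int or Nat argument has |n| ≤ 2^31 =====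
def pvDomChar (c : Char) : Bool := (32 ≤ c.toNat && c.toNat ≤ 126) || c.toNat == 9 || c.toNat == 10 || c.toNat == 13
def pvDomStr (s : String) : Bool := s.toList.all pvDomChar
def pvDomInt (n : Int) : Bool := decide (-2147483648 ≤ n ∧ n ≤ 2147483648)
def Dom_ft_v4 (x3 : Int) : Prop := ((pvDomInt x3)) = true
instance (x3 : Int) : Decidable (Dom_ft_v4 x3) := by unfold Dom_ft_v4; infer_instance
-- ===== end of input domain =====

-- B replaces A's odd-number loop by the closed form ((n+1)//2)^2 and A's quadratic
-- recomputation of each even factorial by one stride-2 pass with a running factorial.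

-- ===== PORT A =====
def factorial_v1 (x7 : Int) : Int :=
  (PySem.List.pyRange 2 (x7 + 1) 1).foldl (fun x4 x2 => x4 * x2) 1

def ft_v4 (x3 : Int) : Int :=
  (PySem.List.pyRange 1 (x3 + 1) 1).foldl
    (fun x6 x1 => if PySem.Int.mod x1 2 = 0 then x6 + factorial_v1 x1 else x6 + x1) 0

-- ===== PORT B =====
def ft_v4_alt (x3 : Int) : Int :=
  if x3 < 1 then 0
  else
    let k := PySem.Int.floordiv (x3 + 1) 2
    ((PySem.List.pyRange 2 (x3 + 1) 2).foldl
      (fun (p : Int × Int) i => (p.1 * ((i - 1) * i), p.2 + p.1 * ((i - 1) * i)))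
      (1, k * k)).2

-- ===== PRECONDITION & SPEC =====
def Spec_ft_v4 (x3 : Int) (out : Int) : Prop := out = ft_v4_alt x3
instance (x3 : Int) (out : Int) : Decidable (Spec_ft_v4 x3 out) := by unfold Spec_ft_v4; infer_instance

-- ===== CLAIM (what is proved, stated in full; the proofs are below) =====
def Claim_equal_ft_v4 : Prop := ∀ (x3 : Int), Dom_ft_v4 x3 → Spec_ft_v4 x3 (ft_v4 x3)

-- ===== LEMMAS AND PROOFS =====

-- reference sum: F n = Σ_{i=1..n} (i! if i even else i)
def refF : Nat → Int
  | 0 => 0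
  | n + 1 => refF n + (if (n + 1) % 2 = 0 then ((n + 1).factorial : Int) else ((n : Int) + 1))

-- reference even-factorial sum: E m = Σ_{j=1..m} (2j)!
def refE : Nat → Int
  | 0 => 0
  | m + 1 => refE m + ((2 * (m + 1)).factorial : Int)

theorem factorial_v1_nat (n : Nat) : factorial_v1 (n : Int) = (n.factorial : Int) := by
  induction n with
  | zero => decide
  | succ n ih =>
    rcases Nat.eq_zero_or_pos n with h | h
    · subst h; decide
    · have h2 : (2 : Int) ≤ (n : Int) + 1 := by omega
      have : PySem.List.pyRange 2 ((n : Int) + 1 + 1) 1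
           = PySem.List.pyRange 2 ((n : Int) + 1) 1 ++ [(n : Int) + 1] := by
        have := PySem.List.pyRange_one_succ_right (a := 2) (b := (n : Int) + 1) h2
        simpa using this
      simp only [factorial_v1] at ih ⊢
      push_cast
      rw [this, List.foldl_append]
      simp only [List.foldl]
      rw [ih]
      rw [Nat.factorial_succ]
      push_cast
      ring

theorem ft_v4_nat (n : Nat) : ft_v4 (n : Int) = refF n := by
  induction n with
  | zero => decide
  | succ n ih =>
    have h1 : (1 : Int) ≤ (n : Int) + 1 := by omega
    have hsplit : PySem.List.pyRange 1 ((n : Int) + 1 + 1) 1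
        = PySem.List.pyRange 1 ((n : Int) + 1) 1 ++ [(n : Int) + 1] := by
      have := PySem.List.pyRange_one_succ_right (a := 1) (b := (n : Int) + 1) h1
      simpa using this
    simp only [ft_v4] at ih ⊢
    push_cast
    rw [hsplit, List.foldl_append]
    simp only [List.foldl]
    rw [ih, refF]
    have hcast : ((n : Int) + 1) = ((n + 1 : Nat) : Int) := by push_cast; ring
    have hmod : PySem.Int.mod ((n : Int) + 1) 2 = (((n + 1) % 2 : Nat) : Int) := by
      rw [hcast]
      exact_mod_cast PySem.Int.mod_natCast (n + 1) 2
    by_cases hpar : (n + 1) % 2 = 0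
    · rw [hmod, hpar]
      rw [hcast, factorial_v1_nat (n + 1)]
      simp
    · have : ¬ PySem.Int.mod ((n : Int) + 1) 2 = 0 := by
        rw [hmod]; exact_mod_cast hpar
      rw [if_neg this, if_neg hpar]

-- A's sum split by parity: F(2m) and F(2m+1) in terms of the closed odd sum and refE
theorem refF_parity (m : Nat) :
    refF (2 * m) = (m : Int) ^ 2 + refE m ∧
    refF (2 * m + 1) = ((m : Int) + 1) ^ 2 + refE m := by
  induction m with
  | zero => constructor <;> decide
  | succ m ih =>
    obtain ⟨_, ih1⟩ := ih
    have e1 : 2 * (m + 1) = (2 * m + 1) + 1 := by omega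
    have e2 : (2 * m + 1 + 1) % 2 = 0 := by omega
    have e3 : (2 * m + 1 + 1 + 1) % 2 = 1 := by omega
    have hF2 : refF (2 * (m + 1)) = ((m : Int) + 1) ^ 2 + refE (m + 1) := by
      rw [e1, refF, ih1, refE, if_pos e2]
      have : 2 * m + 1 + 1 = 2 * (m + 1) := by omega
      rw [this]; ring
    refine ⟨hF2, ?_⟩
    rw [refF, hF2, if_neg (by omega : ¬ (2 * (m + 1) + 1) % 2 = 0)]
    push_cast
    ring

-- B's stride-2 accumulator loop: running factorial invariant
theorem foldB (m : Nat) (t : Int) :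
    ((List.range m).map (fun k : Nat => (2 : Int) + 2 * (k : Int))).foldl
      (fun (p : Int × Int) i => (p.1 * ((i - 1) * i), p.2 + p.1 * ((i - 1) * i)))
      (1, t)
    = (((2 * m).factorial : Int), t + refE m) := by
  induction m with
  | zero => simp [refE]
  | succ m ih =>
    rw [List.range_succ, List.map_append, List.foldl_append, ih]
    simp only [List.map_cons, List.map_nil, List.foldl_cons, List.foldl_nil]
    have hfac : ((2 * m).factorial : Int) * (((2 : Int) + 2 * m - 1) * ((2 : Int) + 2 * m))
        = ((2 * (m + 1)).factorial : Int) := by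
      have : 2 * (m + 1) = (2 * m + 1) + 1 := by omega
      rw [this, Nat.factorial_succ, Nat.factorial_succ]
      push_cast
      ring
    rw [refE, hfac]
    exact Prod.ext rfl (by ring)

theorem ft_v4_alt_nat (n : Nat) (hn : 1 ≤ n) : ft_v4_alt (n : Int) = (((n + 1) / 2 : Nat) : Int) ^ 2 + refE (n / 2) := by
  simp only [ft_v4_alt, if_neg (by omega : ¬ (n : Int) < 1)]
  have hk : PySem.Int.floordiv ((n : Int) + 1) 2 = (((n + 1) / 2 : Nat) : Int) := by
    have : ((n : Int) + 1) = ((n + 1 : Nat) : Int) := by push_cast; ring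
    rw [this]
    exact_mod_cast PySem.Int.floordiv_natCast (n + 1) 2
  have hr : PySem.List.pyRange 2 ((n : Int) + 1) 2
      = (List.range (n / 2)).map (fun k : Nat => (2 : Int) + 2 * (k : Int)) := by
    rw [PySem.List.pyRange_of_pos 2 ((n : Int) + 1) (by norm_num : (0:Int) < 2)]
    have hcnt : (if (2 : Int) < (n : Int) + 1 then (((n : Int) + 1 - 2 + 2 - 1) / 2).toNat else 0) = n / 2 := by
      by_cases h : (2 : Int) < (n : Int) + 1
      · rw [if_pos h]
        have he : ((n : Int) + 1 - 2 + 2 - 1) = (n : Int) := by ring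
        rw [he]
        omega
      · rw [if_neg h]
        omega
    rw [hcnt]
  rw [hk, hr, foldB]
  ring_nf

theorem ft_v4_spec' (x3 : Int) : ft_v4 x3 = ft_v4_alt x3 := by
  rcases le_or_gt x3 0 with h | h
  · have hA : ft_v4 x3 = 0 := by
      simp only [ft_v4]
      rw [PySem.List.pyRange_one_eq_nil (by omega : x3 + 1 ≤ 1)]
      rfl
    have hB : ft_v4_alt x3 = 0 := by
      simp only [ft_v4_alt, if_pos (by omega : x3 < 1)]
    rw [hA, hB]
  · obtain ⟨n, rfl⟩ : ∃ n : Nat, x3 = (n : Int) := ⟨x3.toNat, by omega⟩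
    have hn : 1 ≤ n := by exact_mod_cast h
    rw [ft_v4_nat, ft_v4_alt_nat n hn]
    rcases Nat.even_or_odd n with ⟨m, hm⟩ | ⟨m, hm⟩
    · have h2 : n = 2 * m := by omega
      subst h2
      have : (2 * m + 1) / 2 = m := by omega
      rw [this, (refF_parity m).1]
      have : (2 * m) / 2 = m := by omega
      rw [this]
    · subst hm
      have : (2 * m + 1 + 1) / 2 = m + 1 := by omega
      rw [this, (refF_parity m).2]
      have : (2 * m + 1) / 2 = m := by omega
      rw [this]
      push_cast
      ring

-- ===== VERDICT (by name: the statement is the Claim_ definition above) =====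
theorem ft_v4_spec : Claim_equal_ft_v4 := by
  intro x3 _
  exact ft_v4_spec' x3
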